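-- pv_equiv track=rewrite | github.com/martinkozle/advent-of-code-2024 | src/days/day_07/part1.py | rec
-- ===== SOURCE A (Python) =====
-- def rec(result: int, values: list[int], curr: int, ind: int) -> bool:
--     if ind == len(values):
--         return result == curr
--
--     return rec(
--         result,
--         values,
--         curr + values[ind],
--         ind + 1,
--     ) or rec(
--         result,
--         values,
--         curr * values[ind],
--         ind + 1,
--     )
-- ===== SOURCE B (Python) =====
-- def rec(result: int, values: list[int], curr: int, ind: int) -> bool:
--     reachable = {curr}
--     for i in range(ind, len(values)):
--         v = values[i]
--         reachable = {c + v for c in reachable} | {c * v for c in reachable}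
--     return result in reachable
-- ===== Notes on version B (the rewrite author's own statement) =====
-- stated objective: alternative
-- what changed: Replaces the exponential depth-first recursion over +/* choices with an iterative level-by-level forward pass maintaining the set of reachable intermediate values, deduplicating equal partial results.
import Mathlib
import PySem

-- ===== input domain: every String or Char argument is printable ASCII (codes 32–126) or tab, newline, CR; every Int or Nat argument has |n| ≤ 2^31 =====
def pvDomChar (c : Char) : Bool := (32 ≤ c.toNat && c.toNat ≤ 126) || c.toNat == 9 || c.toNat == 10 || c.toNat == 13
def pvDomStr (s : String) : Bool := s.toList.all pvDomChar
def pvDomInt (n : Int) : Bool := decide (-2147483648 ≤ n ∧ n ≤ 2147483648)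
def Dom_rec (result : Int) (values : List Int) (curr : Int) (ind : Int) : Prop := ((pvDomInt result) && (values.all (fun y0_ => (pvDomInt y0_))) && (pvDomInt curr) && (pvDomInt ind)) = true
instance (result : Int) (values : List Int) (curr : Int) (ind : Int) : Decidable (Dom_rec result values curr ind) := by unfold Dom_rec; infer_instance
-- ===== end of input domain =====

-- B replaces A's depth-first +/* recursion with an iterative level-by-level pass over the
-- set of reachable intermediate values, deduplicating equal partial results (alternative).


-- ===== PORT A =====
-- literal transliteration of A's depth-first recursion; 'none => false' is the IndexError
-- branch, which Pre_rec excludes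
def rec (result : Int) (values : List Int) (curr : Int) (ind : Int) : Bool :=
  if ind = (values.length : Int) then result == curr
  else
    match h : PySem.List.pyGet? values ind with
    | none => false
    | some v =>
        rec result values (curr + v) (ind + 1) || rec result values (curr * v) (ind + 1)
termination_by ((values.length : Int) - ind).toNat
decreasing_by
  all_goals
    have hin : PySem.Raise.InRange values.length ind := by
      by_contra hc
      rw [← PySem.List.pyGet?_eq_none_iff] at hc
      simp [hc] at h
    unfold PySem.Raise.InRange at hin
    omega

-- ===== PORT B =====
-- one loop step of Source B: reachable = {c+v for c in reachable} | {c*v for c in reachable}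
def recStep (values : List Int) (S : PySem.Set Int) (i : Int) : PySem.Set Int :=
  match PySem.List.pyGet? values i with
  | none => S   -- IndexError in Python; unreachable under Pre_rec
  | some v =>
      PySem.Set.union (PySem.Set.ofList (S.map (fun c => c + v)))
                      (PySem.Set.ofList (S.map (fun c => c * v)))

def rec_alt (result : Int) (values : List Int) (curr : Int) (ind : Int) : Bool :=
  PySem.Set.contains
    ((PySem.List.pyRange ind (values.length : Int) 1).foldl (recStep values)
      (PySem.Set.ofList [curr]))
    result

-- ===== PRECONDITION & SPEC =====
-- Pre_rec admits exactly the inputs where Python A returns: outside it A raises IndexError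
-- (ind past the end, or a negative ind below -len).
def Pre_rec (result : Int) (values : List Int) (curr : Int) (ind : Int) : Prop :=
  -(values.length : Int) ≤ ind ∧ ind ≤ (values.length : Int)
instance (result : Int) (values : List Int) (curr : Int) (ind : Int) : Decidable (Pre_rec result values curr ind) := by unfold Pre_rec; infer_instance

def pvWitness_rec : Int × List Int × Int × Int := (9, [2, 3], 1, 0)

def Spec_rec (result : Int) (values : List Int) (curr : Int) (ind : Int) (out : Bool) : Prop := out = rec_alt result values curr ind
instance (result : Int) (values : List Int) (curr : Int) (ind : Int) (out : Bool) : Decidable (Spec_rec result values curr ind out) := by unfold Spec_rec; infer_instance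

-- ===== CLAIM (what is proved, stated in full; the proofs are below) =====
def Claim_equal_rec : Prop := ∀ (result : Int) (values : List Int) (curr : Int) (ind : Int), Dom_rec result values curr ind → Pre_rec result values curr ind → Spec_rec result values curr ind (rec result values curr ind)

-- ===== LEMMAS AND PROOFS =====

-- one unfolding step of A's recursion in the non-base case
theorem rec_step_eq (result : Int) (values : List Int) (curr : Int) (ind : Int) (v : Int)
    (hne : ind ≠ (values.length : Int)) (hv : PySem.List.pyGet? values ind = some v) :
    rec result values curr ind
      = (rec result values (curr + v) (ind + 1) || rec result values (curr * v) (ind + 1)) := by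
  rw [rec, if_neg hne]
  split
  next h => rw [h] at hv; cases hv
  next v' h => rw [h] at hv; injection hv with hv; rw [hv]

-- invariant of B's loop: membership after the remaining sweep = "some seed reaches result by A"
theorem loop_invariant (result : Int) (values : List Int) :
    ∀ (n : Nat) (ind : Int) (S : PySem.Set Int),
      -(values.length : Int) ≤ ind → ind ≤ (values.length : Int) →
      ((values.length : Int) - ind).toNat = n →
      PySem.Set.contains
          ((PySem.List.pyRange ind (values.length : Int) 1).foldl (recStep values) S) result
        = S.any (fun c => rec result values c ind) := by
  intro n
  induction n with
  | zero =>
      intro ind S h1 h2 h0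
      have hEq : ind = (values.length : Int) := by omega
      subst hEq
      rw [PySem.List.pyRange_one_eq_nil (le_refl _)]
      simp only [List.foldl_nil]
      rw [Bool.eq_iff_iff]
      simp only [PySem.Set.contains_iff, List.any_eq_true]
      constructor
      · intro hmem
        exact ⟨result, hmem, by rw [rec]; simp⟩
      · rintro ⟨c, hc, hr⟩
        rw [rec] at hr
        simp at hr
        subst hr
        exact hc
  | succ n ih =>
      intro ind S h1 h2 h0
      have hlt : ind < (values.length : Int) := by omega
      have hin : PySem.Raise.InRange values.length ind := by
        unfold PySem.Raise.InRange; omega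
      obtain ⟨v, hv⟩ : ∃ v, PySem.List.pyGet? values ind = some v := by
        cases hg : PySem.List.pyGet? values ind with
        | none => rw [PySem.List.pyGet?_eq_none_iff] at hg; exact absurd hin hg
        | some v => exact ⟨v, rfl⟩
      rw [PySem.List.pyRange_one_cons hlt]
      simp only [List.foldl_cons]
      have hstep : recStep values S ind
          = PySem.Set.union (PySem.Set.ofList (S.map (fun c => c + v)))
                            (PySem.Set.ofList (S.map (fun c => c * v))) := by
        unfold recStep; rw [hv]
      rw [hstep,
        ih (ind + 1) _ (by omega) (by omega) (by omega)]
      rw [Bool.eq_iff_iff]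
      simp only [List.any_eq_true, PySem.Set.mem_union, PySem.Set.mem_ofList, List.mem_map]
      constructor
      · rintro ⟨c, hc | hc, hr⟩ <;> obtain ⟨c0, hc0, rfl⟩ := hc
        · exact ⟨c0, hc0, by rw [rec_step_eq result values c0 ind v (by omega) hv]; simp [hr]⟩
        · exact ⟨c0, hc0, by rw [rec_step_eq result values c0 ind v (by omega) hv]; simp [hr]⟩
      · rintro ⟨c, hc, hr⟩
        rw [rec_step_eq result values c ind v (by omega) hv] at hr
        rcases Bool.or_eq_true_iff.mp hr with hr | hr
        · exact ⟨c + v, Or.inl ⟨c, hc, rfl⟩, hr⟩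
        · exact ⟨c * v, Or.inr ⟨c, hc, rfl⟩, hr⟩

-- ===== VERDICT (by name: the statement is the Claim_ definition above) =====
theorem rec_spec : Claim_equal_rec := by
  intro result values curr ind _ hpre
  unfold Spec_rec rec_alt
  rw [loop_invariant result values ((values.length : Int) - ind).toNat ind _ hpre.1 hpre.2 rfl]
  simp [PySem.Set.ofList]
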